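-- pv_equiv track=rewrite | github.com/albpurpura/PLTR | main_dasalc_mslr10k.py | group_rj_in_ranking_lists_no_pad_trim
-- ===== SOURCE A (Python) =====
-- def group_rj_in_ranking_lists_no_pad_trim(qids, labs):
--     ranking_lists = {}
--     for i in range(len(qids)):
--         qid = qids[i]
--         label = labs[i]
--         if qid in ranking_lists.keys():
--             ranking_lists[qid].append(label)
--         else:
--             ranking_lists[qid] = [label]
--     doc_scores = []
--     doc_rj = []
--     for k, ranking_list in ranking_lists.items():
--         curr_scores = []
--         curr_rj = []
--         for i in range(len(ranking_list)):
--             curr_rj.append(ranking_list[i])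
--         doc_scores.append(curr_scores)
--         doc_rj.append(curr_rj)
--     return doc_rj
-- ===== SOURCE B (Python) =====
-- def group_rj_in_ranking_lists_no_pad_trim(qids, labs):
--     uniq = []
--     for q in qids:
--         if q not in uniq:
--             uniq.append(q)
--     return [[lab for q2, lab in zip(qids, labs) if q2 == q] for q in uniq]
-- ===== Notes on version B (the rewrite author's own statement) =====
-- stated objective: simpler
-- what changed: Replaces the index-driven dict accumulation plus a second copying loop with a two-phase shape: collect distinct qids in first-appearance order, then one zip-filter comprehension per distinct qid; the unused doc_scores bookkeeping is dropped.
import Mathlib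
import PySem

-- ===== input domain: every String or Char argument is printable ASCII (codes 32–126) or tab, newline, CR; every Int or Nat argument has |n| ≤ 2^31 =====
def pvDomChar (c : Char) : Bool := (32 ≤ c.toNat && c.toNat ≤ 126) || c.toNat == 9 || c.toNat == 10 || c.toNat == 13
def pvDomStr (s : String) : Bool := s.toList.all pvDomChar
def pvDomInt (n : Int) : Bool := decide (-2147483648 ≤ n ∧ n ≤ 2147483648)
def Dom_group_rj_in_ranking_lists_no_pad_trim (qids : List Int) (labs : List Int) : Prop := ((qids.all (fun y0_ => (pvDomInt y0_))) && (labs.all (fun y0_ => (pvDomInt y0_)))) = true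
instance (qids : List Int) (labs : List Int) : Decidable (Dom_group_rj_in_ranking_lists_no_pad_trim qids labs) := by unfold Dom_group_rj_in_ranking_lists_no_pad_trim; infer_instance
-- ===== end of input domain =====

-- B groups labels by distinct qid via a collect-distinct-then-filter-per-qid pass instead of A's
-- index-driven dict accumulation plus copy loop ("simpler" decomposition; return value only).

-- ===== PORT A =====
-- pyGetD with default 0 is exact for qids[i]/labs[i] here: under Pre_ every accessed index is in
-- range (out of range = Python IndexError, excluded by Pre_).
def group_rj_in_ranking_lists_no_pad_trim (qids : List Int) (labs : List Int) : List (List Int) :=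
  let ranking_lists : PySem.Dict Int (List Int) :=
    (PySem.List.pyRange 0 (PySem.List.len qids) 1).foldl
      (fun d i =>
        let qid := PySem.List.pyGetD qids i 0
        let label := PySem.List.pyGetD labs i 0
        if d.contains qid then d.insert qid (d.getD qid [] ++ [label])
        else d.insert qid [label])
      PySem.Dict.empty
  -- second loop: doc_scores/curr_scores are built but unused in the returned value; doc_rj below
  ranking_lists.items.foldl
    (fun doc_rj kv =>
      let curr_rj :=
        (PySem.List.pyRange 0 (PySem.List.len kv.2) 1).foldl
          (fun c i => c ++ [PySem.List.pyGetD kv.2 i 0]) []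
      doc_rj ++ [curr_rj])
    []

-- ===== PORT B =====
def group_rj_in_ranking_lists_no_pad_trim_alt (qids : List Int) (labs : List Int) : List (List Int) :=
  let uniq := qids.foldl (fun acc q => if acc.contains q then acc else acc ++ [q]) []
  uniq.map (fun q => ((qids.zip labs).filter (fun p => p.1 == q)).map (fun p => p.2))

-- ===== PRECONDITION & SPEC =====
-- Pre_ excludes exactly the inputs where A raises IndexError (labs shorter than qids).
def Pre_group_rj_in_ranking_lists_no_pad_trim (qids : List Int) (labs : List Int) : Prop :=
  qids.length ≤ labs.length
instance (qids : List Int) (labs : List Int) : Decidable (Pre_group_rj_in_ranking_lists_no_pad_trim qids labs) := by unfold Pre_group_rj_in_ranking_lists_no_pad_trim; infer_instance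
def pvWitness_group_rj_in_ranking_lists_no_pad_trim : List Int × List Int := ([1, 2, 1, 3], [10, 20, 30, 40])

def Spec_group_rj_in_ranking_lists_no_pad_trim (qids : List Int) (labs : List Int) (out : List (List Int)) : Prop := out = group_rj_in_ranking_lists_no_pad_trim_alt qids labs
instance (qids : List Int) (labs : List Int) (out : List (List Int)) : Decidable (Spec_group_rj_in_ranking_lists_no_pad_trim qids labs out) := by unfold Spec_group_rj_in_ranking_lists_no_pad_trim; infer_instance

-- ===== CLAIM (what is proved, stated in full; the proofs are below) =====
def Claim_equal_group_rj_in_ranking_lists_no_pad_trim : Prop := ∀ (qids : List Int) (labs : List Int), Dom_group_rj_in_ranking_lists_no_pad_trim qids labs → Pre_group_rj_in_ranking_lists_no_pad_trim qids labs → Spec_group_rj_in_ranking_lists_no_pad_trim qids labs (group_rj_in_ranking_lists_no_pad_trim qids labs)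
-- ===== LEMMAS AND PROOFS =====

-- A's dict-building step is an insert with a value chosen by the contains test.
def pvStep (d : PySem.Dict Int (List Int)) (p : Int × Int) : PySem.Dict Int (List Int) :=
  if d.contains p.1 then d.insert p.1 (d.getD p.1 [] ++ [p.2]) else d.insert p.1 [p.2]

lemma pvStep_getD (d : PySem.Dict Int (List Int)) (p : Int × Int) (c : Int) :
    (pvStep d p).getD c [] = d.getD c [] ++ (if p.1 = c then [p.2] else []) := by
  unfold pvStep
  by_cases hc : c = p.1
  · subst hc
    by_cases h1 : d.contains p.1
    · rw [if_pos h1, PySem.Dict.getD_insert, if_pos rfl, if_pos rfl]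
    · rw [if_neg h1, PySem.Dict.getD_insert, if_pos rfl, if_pos rfl,
          PySem.Dict.getD_of_not_contains (h := by simpa using h1)]
      simp
  · have hc' : ¬ (p.1 = c) := fun e => hc e.symm
    by_cases h1 : d.contains p.1
    · rw [if_pos h1, PySem.Dict.getD_insert, if_neg hc, if_neg hc']
      simp
    · rw [if_neg h1, PySem.Dict.getD_insert, if_neg hc, if_neg hc']
      simp

lemma pvFold_getD (l : List (Int × Int)) (d : PySem.Dict Int (List Int)) (c : Int) :
    (l.foldl pvStep d).getD c [] = d.getD c [] ++ (l.filter (fun p => p.1 == c)).map (fun p => p.2) := by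
  induction l generalizing d with
  | nil => simp
  | cons p t ih =>
    simp only [List.foldl_cons, ih, pvStep_getD, List.filter_cons]
    by_cases h : p.1 = c <;> simp [h]

lemma pvStep_eq_insert (d : PySem.Dict Int (List Int)) (p : Int × Int) :
    pvStep d p = d.insert p.1 ((fun d (p : Int × Int) => if d.contains p.1 then d.getD p.1 [] ++ [p.2] else [p.2]) d p) := by
  unfold pvStep; split_ifs with h <;> simp [h]

lemma pvFold_keys (l : List (Int × Int)) :
    (l.foldl pvStep PySem.Dict.empty).keys = PySem.Set.ofList (l.map (fun p => p.1)) := by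
  have h : l.foldl pvStep PySem.Dict.empty
      = l.foldl (fun d p => d.insert p.1 ((fun d (p : Int × Int) => if d.contains p.1 then d.getD p.1 [] ++ [p.2] else [p.2]) d p)) PySem.Dict.empty := by
    apply PySem.List.foldl_congr_mem; intro acc x _; exact pvStep_eq_insert acc x
  rw [h, PySem.Dict.keys_foldl_insert_key]
  simp only [PySem.Dict.keys_empty]
  rw [PySem.Set.update_nil_left]

lemma pvFold_nodup_keys (l : List (Int × Int)) :
    (l.foldl pvStep PySem.Dict.empty).keys.Nodup := by
  have h : l.foldl pvStep PySem.Dict.empty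
      = l.foldl (fun d p => d.insert p.1 ((fun d (p : Int × Int) => if d.contains p.1 then d.getD p.1 [] ++ [p.2] else [p.2]) d p)) PySem.Dict.empty := by
    apply PySem.List.foldl_congr_mem; intro acc x _; exact pvStep_eq_insert acc x
  rw [h]
  exact PySem.Dict.nodup_keys_foldl_insert_key _ _ _ _ PySem.Dict.nodup_keys_empty

-- the inner copying loop of A's second pass returns the list itself
lemma pvCopy_eq (l : List Int) :
    (PySem.List.pyRange 0 (PySem.List.len l) 1).foldl (fun c i => c ++ [PySem.List.pyGetD l i 0]) [] = l := by
  rw [PySem.List.foldl_pyRange_zero_pyGetD l 0 (fun c x => c ++ [x]) []]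
  exact PySem.List.foldl_append_singleton l []

-- the index loop over range(len(qids)) is the fold of pvStep over zip(qids, labs)
lemma pvMainFold_eq (qids labs : List Int) (h : qids.length ≤ labs.length) :
    (PySem.List.pyRange 0 (PySem.List.len qids) 1).foldl
      (fun d i =>
        let qid := PySem.List.pyGetD qids i 0
        let label := PySem.List.pyGetD labs i 0
        if d.contains qid then d.insert qid (d.getD qid [] ++ [label])
        else d.insert qid [label])
      PySem.Dict.empty
    = (qids.zip labs).foldl pvStep PySem.Dict.empty := by
  have hlen : (qids.zip labs).length = qids.length := by
    simp [List.length_zip]; omega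
  have hcongr :
      (PySem.List.pyRange 0 (PySem.List.len qids) 1).foldl
        (fun d i =>
          let qid := PySem.List.pyGetD qids i 0
          let label := PySem.List.pyGetD labs i 0
          if d.contains qid then d.insert qid (d.getD qid [] ++ [label])
          else d.insert qid [label])
        PySem.Dict.empty
      = (PySem.List.pyRange 0 (PySem.List.len (qids.zip labs)) 1).foldl
        (fun d i => pvStep d (PySem.List.pyGetD (qids.zip labs) i (0, 0)))
        PySem.Dict.empty := by
    have hl : PySem.List.len qids = PySem.List.len (qids.zip labs) := by
      simp [PySem.List.len, hlen]
    rw [← hl]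
    apply PySem.List.foldl_congr_mem
    intro acc i hi
    rw [PySem.List.mem_pyRange_one] at hi
    have hiq : i < (qids.length : Int) := by simpa [PySem.List.len] using hi.2
    have hq : PySem.List.pyGetD (qids.zip labs) i (0, 0)
        = (PySem.List.pyGetD qids i 0, PySem.List.pyGetD labs i 0) := by
      rw [PySem.List.pyGetD_eq_getElem _ _ hi.1 (by omega),
          PySem.List.pyGetD_eq_getElem _ _ hi.1 (by omega),
          PySem.List.pyGetD_eq_getElem _ _ hi.1 (by omega)]
      exact List.getElem_zip
    simp only [pvStep, hq]
  rw [hcongr, PySem.List.foldl_pyRange_zero_pyGetD]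

theorem pv_main (qids labs : List Int) (h : qids.length ≤ labs.length) :
    group_rj_in_ranking_lists_no_pad_trim qids labs
      = group_rj_in_ranking_lists_no_pad_trim_alt qids labs := by
  unfold group_rj_in_ranking_lists_no_pad_trim group_rj_in_ranking_lists_no_pad_trim_alt
  rw [pvMainFold_eq qids labs h]
  set d := (qids.zip labs).foldl pvStep PySem.Dict.empty with hd
  -- A's second loop copies each value: it is d.values
  have h2 : d.items.foldl
      (fun doc_rj kv =>
        let curr_rj :=
          (PySem.List.pyRange 0 (PySem.List.len kv.2) 1).foldl
            (fun c i => c ++ [PySem.List.pyGetD kv.2 i 0]) []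
        doc_rj ++ [curr_rj])
      []
      = d.items.map (fun kv => kv.2) := by
    have : d.items.foldl
        (fun doc_rj kv =>
          let curr_rj :=
            (PySem.List.pyRange 0 (PySem.List.len kv.2) 1).foldl
              (fun c i => c ++ [PySem.List.pyGetD kv.2 i 0]) []
          doc_rj ++ [curr_rj])
        []
        = d.items.foldl (fun doc_rj kv => doc_rj ++ [kv.2]) [] := by
      apply PySem.List.foldl_congr_mem
      intro acc kv _
      simp only [pvCopy_eq kv.2]
    rw [this, PySem.List.foldl_append_singleton_eq_map]
    simp
  rw [h2]
  -- d.items.map snd = d.values = keys.map (getD · [])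
  have hv : d.items.map (fun kv => kv.2) = d.keys.map (fun k => d.getD k []) := by
    rw [PySem.Dict.items_eq_map_keys d (pvFold_nodup_keys _) []]
    simp
  rw [hv, pvFold_keys]
  -- B's uniq fold is Set.ofList qids
  have hb : (qids.foldl (fun acc q => if acc.contains q then acc else acc ++ [q]) []) =
      PySem.Set.ofList qids := by
    rw [PySem.Set.ofList_eq_foldl]; rfl
  rw [hb]
  have hfst : (qids.zip labs).map (fun p => p.1) = qids := List.map_fst_zip h
  rw [hfst]
  apply List.map_congr_left
  intro k _
  rw [pvFold_getD]
  simp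

-- ===== VERDICT (by name: the statement is the Claim_ definition above) =====
theorem group_rj_in_ranking_lists_no_pad_trim_spec : Claim_equal_group_rj_in_ranking_lists_no_pad_trim := by
  intro qids labs _ hpre
  unfold Spec_group_rj_in_ranking_lists_no_pad_trim
  exact pv_main qids labs hpre
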